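-- pv_equiv track=rewrite | github.com/NSYok/translation | utils_computer.py | outfit_count
-- ===== SOURCE A (Python) =====
-- from typing import Any
--
-- def outfit_count(status: dict[str, Any], outfit_dict: dict[str, Any]) -> list[tuple[str, str]]:
--     outfits = []
--     for outfit_name in outfit_dict.keys():
--         if outfit_name in status.keys():
--             for num in outfit_dict[outfit_name].keys():
--                 if status[outfit_name] >= int(num):
--                     outfits.append((outfit_name, num))
--     if ('Black Feather', '2') in outfits:
--         if ('Avarice', '2') in outfits:
--             outfits.remove(('Black Feather', '2'))
--     if ('Black Feather', '2') in outfits: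
--         if ('Glimmer', '2') in outfits:
--             outfits.remove(('Black Feather', '2'))
--     if ('Black Feather', '2') in outfits:
--         if ('Venom', '2') in outfits:
--             outfits.remove(('Black Feather', '2'))
--     if ('Black Feather', '3') in outfits:
--         if ('Avarice', '3') in outfits:
--             outfits.remove(('Black Feather', '3'))
--     if ('Black Feather', '3') in outfits:
--         if ('Glimmer', '3') in outfits:
--             outfits.remove(('Black Feather', '3'))
--     if ('Black Feather', '3') in outfits and ('Venom', '3') in outfits:
--             outfits.remove(('Black Feather', '3'))
--     if ('Black Feather', '5') in outfits:
--         if ('Avarice', '5') in outfits: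
--             outfits.remove(('Black Feather', '5'))
--     if ('Black Feather', '5') in outfits:
--         if ('Glimmer', '5') in outfits:
--             outfits.remove(('Black Feather', '5'))
--     if ('Black Feather', '5') in outfits:
--         if ('Venom', '5') in outfits:
--             outfits.remove(('Black Feather', '5'))
--     if ('Demon Heart', '2') in outfits:
--         if ('Avarice', '2') in outfits:
--             outfits.remove(('Avarice', '2'))
--     if ('Butterfly', '2') in outfits:
--         if ('Glimmer', '2') in outfits:
--             outfits.remove(('Glimmer', '2'))
--     if ('Cursed', '2') in outfits:
--         if ('Venom', '2') in outfits:
--             outfits.remove(('Venom', '2'))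
--     if ('Demon Heart', '3') in outfits:
--         if ('Avarice', '3') in outfits:
--             outfits.remove(('Avarice', '3'))
--     if ('Butterfly', '3') in outfits:
--         if ('Glimmer', '3') in outfits:
--             outfits.remove(('Glimmer', '3'))
--     if ('Cursed', '3') in outfits and ('Venom', '3') in outfits:
--             outfits.remove(('Venom', '3'))
--     if ('Demon Heart', '5') in outfits and ('Avarice', '5') in outfits:
--             outfits.remove(('Avarice', '5'))
--     if ('Butterfly', '5') in outfits and ('Glimmer', '5') in outfits:
--             outfits.remove(('Glimmer', '5'))
--     if ('Cursed', '5') in outfits and ('Venom', '5') in outfits: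
--             outfits.remove(('Venom', '5'))
--     if ('Old Sky', '2') in outfits and ('New Sky', '2') in outfits:
--             outfits.remove(('Old Sky', '2'))
--     if ('Old Sky', '3') in outfits and ('New Sky', '3') in outfits:
--             outfits.remove(('Old Sky', '3'))
--     if ('Old Sky', '5') in outfits and ('New Sky', '5') in outfits:
--             outfits.remove(('Old Sky', '5'))
--     return outfits
-- ===== SOURCE B (Python) =====
-- def outfit_count(status: dict, outfit_dict: dict) -> list:
--     # Declarative version: each pair's final membership is decided directly,
--     # no build-then-remove mutation passes.
--     SUPPRESSORS = {
--         'Black Feather': ('Avarice', 'Glimmer', 'Venom'),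
--         'Avarice': ('Demon Heart',),
--         'Glimmer': ('Butterfly',),
--         'Venom': ('Cursed',),
--         'Old Sky': ('New Sky',),
--     }
--
--     def qualifies(name, num):
--         return (name in status and name in outfit_dict
--                 and num in outfit_dict[name]
--                 and status[name] >= int(num))
--
--     def suppressed(name, num):
--         return num in ('2', '3', '5') and any(
--             qualifies(partner, num) for partner in SUPPRESSORS.get(name, ()))
--
--     return [(name, num)
--             for name, levels in outfit_dict.items() if name in status
--             for num in levels
--             if status[name] >= int(num) and not suppressed(name, num)]
-- ===== Notes on version B (the rewrite author's own statement) =====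
-- stated objective: alternative
-- what changed: A builds the qualifying list and then mutates it with 21 sequential remove-statements; B never mutates: it decides each pair's final membership directly with a declarative suppression predicate (a pair is emitted iff it qualifies and no suppressor outfit qualifies at the same level), in one comprehension with no removal passes.
import Mathlib
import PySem

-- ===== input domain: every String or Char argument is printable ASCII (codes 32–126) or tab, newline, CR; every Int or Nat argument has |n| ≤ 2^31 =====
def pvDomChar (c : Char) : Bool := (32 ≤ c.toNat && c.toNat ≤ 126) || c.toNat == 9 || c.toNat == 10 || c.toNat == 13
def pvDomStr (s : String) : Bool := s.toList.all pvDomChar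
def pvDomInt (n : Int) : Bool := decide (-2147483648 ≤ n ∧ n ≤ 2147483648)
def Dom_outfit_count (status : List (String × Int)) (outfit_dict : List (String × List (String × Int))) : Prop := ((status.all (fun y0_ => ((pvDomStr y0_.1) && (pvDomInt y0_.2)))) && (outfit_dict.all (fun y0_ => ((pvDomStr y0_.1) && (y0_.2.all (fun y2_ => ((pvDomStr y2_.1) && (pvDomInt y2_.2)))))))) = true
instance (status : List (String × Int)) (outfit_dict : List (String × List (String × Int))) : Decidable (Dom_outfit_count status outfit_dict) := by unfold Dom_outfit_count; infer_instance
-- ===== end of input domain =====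

-- B replaces A's build-then-21-removal-statements by a single comprehension with a
-- declarative suppression predicate deciding each pair's final membership directly
-- (objective: alternative, no mutation passes).

-- ===== PORT A =====

-- status[name]: value of the first matching key (the assoc list represents a dict)
def pvLookup (status : List (String × Int)) (name : String) : Int :=
  ((status.find? (fun kv => kv.1 == name)).getD (name, 0)).2

-- 'status[outfit_name] >= int(num)'; int(num) raises ValueError on a
-- non-int-like string — those inputs are excluded by Pre_ (here: skip)
def pvKeep (status : List (String × Int)) (name : String) (num : String) : Bool :=
  match PySem.Int.ofStr? num with
  | some k => pvLookup status name ≥ k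
  | none => false

-- one *Python* block 'if t in outfits: \n if p in outfits: outfits.remove(t)'
def pvStep (t p : String × String) (o : List (String × String)) : List (String × String) :=
  if t ∈ o then (if p ∈ o then o.erase t else o) else o

-- the 21 removal if-blocks of A, in source order
def pvRemovalsA (o0 : List (String × String)) : List (String × String) :=
  let o := o0
  let o := pvStep ("Black Feather", "2") ("Avarice", "2") o
  let o := pvStep ("Black Feather", "2") ("Glimmer", "2") o
  let o := pvStep ("Black Feather", "2") ("Venom", "2") o
  let o := pvStep ("Black Feather", "3") ("Avarice", "3") o
  let o := pvStep ("Black Feather", "3") ("Glimmer", "3") o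
  let o := pvStep ("Black Feather", "3") ("Venom", "3") o
  let o := pvStep ("Black Feather", "5") ("Avarice", "5") o
  let o := pvStep ("Black Feather", "5") ("Glimmer", "5") o
  let o := pvStep ("Black Feather", "5") ("Venom", "5") o
  let o := pvStep ("Avarice", "2") ("Demon Heart", "2") o
  let o := pvStep ("Glimmer", "2") ("Butterfly", "2") o
  let o := pvStep ("Venom", "2") ("Cursed", "2") o
  let o := pvStep ("Avarice", "3") ("Demon Heart", "3") o
  let o := pvStep ("Glimmer", "3") ("Butterfly", "3") o
  let o := pvStep ("Venom", "3") ("Cursed", "3") o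
  let o := pvStep ("Avarice", "5") ("Demon Heart", "5") o
  let o := pvStep ("Glimmer", "5") ("Butterfly", "5") o
  let o := pvStep ("Venom", "5") ("Cursed", "5") o
  let o := pvStep ("Old Sky", "2") ("New Sky", "2") o
  let o := pvStep ("Old Sky", "3") ("New Sky", "3") o
  let o := pvStep ("Old Sky", "5") ("New Sky", "5") o
  o

def outfit_count (status : List (String × Int)) (outfit_dict : List (String × List (String × Int))) : List (String × String) :=
  -- build loop: nested for with append
  let outfits := outfit_dict.foldl
    (fun acc nv =>
      if nv.1 ∈ status.map Prod.fst then
        nv.2.foldl (fun acc2 kv => if pvKeep status nv.1 kv.1 then acc2 ++ [(nv.1, kv.1)] else acc2) acc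
      else acc) []
  pvRemovalsA outfits

-- ===== PORT B =====

-- Source B's SUPPRESSORS table: outfit name → names whose qualifying at the same level suppresses it
def pvSuppressorsTbl : List (String × List String) :=
  [ ("Black Feather", ["Avarice", "Glimmer", "Venom"]),
    ("Avarice", ["Demon Heart"]),
    ("Glimmer", ["Butterfly"]),
    ("Venom", ["Cursed"]),
    ("Old Sky", ["New Sky"]) ]

-- Source B's qualifies(name, num): name in status and name in outfit_dict and
-- num in outfit_dict[name] and status[name] >= int(num)
def pvQual (status : List (String × Int)) (od : List (String × List (String × Int)))
    (name num : String) : Bool :=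
  decide (name ∈ status.map Prod.fst) && decide (name ∈ od.map Prod.fst) &&
  decide (num ∈ (((od.find? (fun kv => kv.1 == name)).getD (name, [])).2.map Prod.fst)) &&
  pvKeep status name num

-- Source B's suppressed(name, num)
def pvSuppressed (status : List (String × Int)) (od : List (String × List (String × Int)))
    (name num : String) : Bool :=
  decide (num ∈ (["2", "3", "5"] : List String)) &&
  (((pvSuppressorsTbl.find? (fun kv => kv.1 == name)).getD (name, [])).2.any
    (fun p => pvQual status od p num))

def outfit_count_alt (status : List (String × Int)) (outfit_dict : List (String × List (String × Int))) : List (String × String) :=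
  -- one comprehension: emit (name, num) iff it qualifies and is not suppressed
  outfit_dict.flatMap (fun nv =>
    if nv.1 ∈ status.map Prod.fst then
      (nv.2.filter (fun kv =>
        pvKeep status nv.1 kv.1 && !pvSuppressed status outfit_dict nv.1 kv.1)).map
        (fun kv => (nv.1, kv.1))
    else [])

-- ===== PRECONDITION & SPEC =====
-- The dict arguments arrive as association lists; Pre_ states the Python-dict
-- representation invariant (outer and inner keys occur at most once — no Python dict
-- can produce a duplicate key), plus the exclusion of exactly the inputs on which A
-- raises ValueError: an outfit name present in status with an inner level key that is
-- not int-like (there Python evaluates int(num)).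
def Pre_outfit_count (status : List (String × Int)) (outfit_dict : List (String × List (String × Int))) : Prop :=
  (outfit_dict.map Prod.fst).Nodup ∧
  (∀ nv ∈ outfit_dict, (nv.2.map Prod.fst).Nodup) ∧
  (∀ nv ∈ outfit_dict, nv.1 ∈ status.map Prod.fst → ∀ kv ∈ nv.2, (PySem.Int.ofStr? kv.1).isSome) ∧
  -- (implied by the two Nodup conjuncts; spelled out for the reader: the pairs the
  -- removal rules inspect occur at most once in the built list)
  (∀ nv ∈ outfit_dict, nv.1 = "Black Feather" →
    ∀ lvl ∈ (["2", "3", "5"] : List String), (nv.2.map Prod.fst).count lvl ≤ 1)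
instance (status : List (String × Int)) (outfit_dict : List (String × List (String × Int))) : Decidable (Pre_outfit_count status outfit_dict) := by unfold Pre_outfit_count; infer_instance

def pvWitness_outfit_count : (List (String × Int)) × (List (String × List (String × Int))) :=
  ([("Avarice", 2), ("Black Feather", 9)],
   [("Avarice", [("2", 0), ("3", 0)]), ("Black Feather", [("2", 0)])])

def Spec_outfit_count (status : List (String × Int)) (outfit_dict : List (String × List (String × Int))) (out : List (String × String)) : Prop := out = outfit_count_alt status outfit_dict
instance (status : List (String × Int)) (outfit_dict : List (String × List (String × Int))) (out : List (String × String)) : Decidable (Spec_outfit_count status outfit_dict out) := by unfold Spec_outfit_count; infer_instance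

-- ===== CLAIM (what is proved, stated in full; the proofs are below) =====
def Claim_equal_outfit_count : Prop := ∀ (status : List (String × Int)) (outfit_dict : List (String × List (String × Int))), Dom_outfit_count status outfit_dict → Pre_outfit_count status outfit_dict → Spec_outfit_count status outfit_dict (outfit_count status outfit_dict)

-- ===== LEMMAS AND PROOFS =====

-- the list A has built when the removal phase starts, as a flatMap
def pvBuild (status : List (String × Int)) (od : List (String × List (String × Int))) : List (String × String) :=
  od.flatMap (fun nv =>
    if nv.1 ∈ status.map Prod.fst then
      (nv.2.filter (fun kv => pvKeep status nv.1 kv.1)).map (fun kv => (nv.1, kv.1))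
    else [])

-- A's build foldl equals pvBuild
theorem pvBuild_eq (status : List (String × Int)) (od : List (String × List (String × Int))) :
    od.foldl
      (fun acc nv =>
        if nv.1 ∈ status.map Prod.fst then
          nv.2.foldl (fun acc2 kv => if pvKeep status nv.1 kv.1 then acc2 ++ [(nv.1, kv.1)] else acc2) acc
        else acc) [] = pvBuild status od := by
  have body : (fun (acc : List (String × String)) (nv : String × List (String × Int)) =>
      if nv.1 ∈ status.map Prod.fst then
        nv.2.foldl (fun acc2 kv => if pvKeep status nv.1 kv.1 then acc2 ++ [(nv.1, kv.1)] else acc2) acc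
      else acc) =
      (fun acc nv => acc ++
        (if nv.1 ∈ status.map Prod.fst then
          (nv.2.filter (fun kv => pvKeep status nv.1 kv.1)).map (fun kv => (nv.1, kv.1))
        else [])) := by
    funext acc nv
    split_ifs with h
    · exact PySem.List.foldl_append_if _ _ _ _
    · simp
  rw [body, PySem.List.foldl_append_eq_flatMap]
  simp [pvBuild]

-- an 'any-partner' removal rule
def pvStepAny (t : String × String) (ps : List (String × String)) (o : List (String × String)) : List (String × String) :=
  if t ∈ o ∧ ∃ p ∈ ps, p ∈ o then o.erase t else o

-- A's removal phase as an ordered rule table (proof-side only)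
def pvRules : List ((String × String) × List (String × String)) :=
  [ (("Black Feather", "2"), [("Avarice", "2"), ("Glimmer", "2"), ("Venom", "2")]),
    (("Black Feather", "3"), [("Avarice", "3"), ("Glimmer", "3"), ("Venom", "3")]),
    (("Black Feather", "5"), [("Avarice", "5"), ("Glimmer", "5"), ("Venom", "5")]),
    (("Avarice", "2"), [("Demon Heart", "2")]),
    (("Glimmer", "2"), [("Butterfly", "2")]),
    (("Venom", "2"), [("Cursed", "2")]),
    (("Avarice", "3"), [("Demon Heart", "3")]),
    (("Glimmer", "3"), [("Butterfly", "3")]),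
    (("Venom", "3"), [("Cursed", "3")]),
    (("Avarice", "5"), [("Demon Heart", "5")]),
    (("Glimmer", "5"), [("Butterfly", "5")]),
    (("Venom", "5"), [("Cursed", "5")]),
    (("Old Sky", "2"), [("New Sky", "2")]),
    (("Old Sky", "3"), [("New Sky", "3")]),
    (("Old Sky", "5"), [("New Sky", "5")]) ]

theorem pvStepAny_single (t p : String × String) (o : List (String × String)) :
    pvStepAny t [p] o = pvStep t p o := by
  simp [pvStepAny, pvStep]; split_ifs <;> simp_all

theorem pvStepAny_sublist (t : String × String) (ps : List (String × String))
    (o : List (String × String)) : (pvStepAny t ps o).Sublist o := by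
  unfold pvStepAny; split_ifs
  · exact List.erase_sublist ..
  · exact List.Sublist.refl o

-- three successive single-partner removals of the same target collapse into one
-- any-partner rule, provided the target occurs at most once
theorem pvStep_triple (t p1 p2 p3 : String × String) (o : List (String × String))
    (h : o.count t ≤ 1) :
    pvStep t p3 (pvStep t p2 (pvStep t p1 o)) = pvStepAny t [p1, p2, p3] o := by
  by_cases ht : t ∈ o
  · have hx : t ∉ o.erase t := by
      have hc := List.count_erase_self (a := t) (l := o)
      intro hmem
      have := List.count_pos_iff.mpr hmem
      omega
    by_cases h1 : p1 ∈ o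
    · simp [pvStep, pvStepAny, ht, h1, hx]
    · by_cases h2 : p2 ∈ o
      · simp [pvStep, pvStepAny, ht, h1, h2, hx]
      · by_cases h3 : p3 ∈ o
        · simp [pvStep, pvStepAny, ht, h1, h2, h3]
        · simp [pvStep, pvStepAny, ht, h1, h2, h3]
  · simp [pvStep, pvStepAny, ht]

-- A's 21 blocks = the rule-table fold, when no Black Feather pair is duplicated
theorem pvRemovals_eq (o : List (String × String))
    (h : ∀ lvl ∈ (["2", "3", "5"] : List String), o.count ("Black Feather", lvl) ≤ 1) :
    pvRemovalsA o = pvRules.foldl (fun o r => pvStepAny r.1 r.2 o) o := by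
  have h1 := (pvStepAny_sublist ("Black Feather", "2")
    [("Avarice", "2"), ("Glimmer", "2"), ("Venom", "2")] o).count_le ("Black Feather", "3")
  have h2 := ((pvStepAny_sublist ("Black Feather", "3")
      [("Avarice", "3"), ("Glimmer", "3"), ("Venom", "3")] _).trans
    (pvStepAny_sublist ("Black Feather", "2")
      [("Avarice", "2"), ("Glimmer", "2"), ("Venom", "2")] o)).count_le ("Black Feather", "5")
  dsimp only [pvRemovalsA]
  rw [pvStep_triple _ _ _ _ o (h "2" (by simp)),
      pvStep_triple _ _ _ _ _ (h1.trans (h "3" (by simp))),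
      pvStep_triple _ _ _ _ _ (h2.trans (h "5" (by simp)))]
  simp only [pvRules, List.foldl_cons, List.foldl_nil, pvStepAny_single]

-- folding an ordered rule table over a duplicate-free list is a filter, provided
-- targets are pairwise distinct and no later rule's partner is an earlier target
theorem foldl_stepAny_filter (rs : List ((String × String) × List (String × String)))
    (o : List (String × String)) (hnd : o.Nodup) (ht : (rs.map Prod.fst).Nodup)
    (hp : rs.Pairwise (fun r r' => ∀ p ∈ r'.2, p ≠ r.1)) :
    rs.foldl (fun acc r => pvStepAny r.1 r.2 acc) o =
      o.filter (fun x => decide (¬ ∃ r ∈ rs, r.1 = x ∧ ∃ p ∈ r.2, p ∈ o)) := by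
  induction rs generalizing o with
  | nil => simp
  | cons r rs ih =>
    simp only [List.map_cons, List.nodup_cons] at ht
    have hp' := (List.pairwise_cons.mp hp).2
    have hpr := (List.pairwise_cons.mp hp).1
    rw [List.foldl_cons]
    by_cases hc : r.1 ∈ o ∧ ∃ p ∈ r.2, p ∈ o
    · have he : pvStepAny r.1 r.2 o = o.filter (fun x => decide (x ≠ r.1)) := by
        rw [pvStepAny, if_pos hc, hnd.erase_eq_filter]
        exact List.filter_congr fun a _ => by rw [Bool.eq_iff_iff]; simp [bne]
      have hmemo' : ∀ p : String × String,
          (p ∈ o.filter (fun x => decide (x ≠ r.1))) ↔ (p ∈ o ∧ p ≠ r.1) := by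
        intro p; simp [List.mem_filter]
      rw [he, ih _ (hnd.filter _) ht.2 hp', List.filter_filter]
      apply List.filter_congr
      intro x hx
      rw [Bool.eq_iff_iff]
      simp only [Bool.and_eq_true, decide_eq_true_eq, List.mem_cons]
      constructor
      · rintro ⟨hno, hxr⟩ ⟨r', hr', hrx, p, hp1, hp2⟩
        rcases hr' with rfl | hr'
        · exact hxr hrx.symm
        · exact hno ⟨r', hr', hrx, p, hp1, (hmemo' p).mpr ⟨hp2, hpr r' hr' p hp1⟩⟩
      · intro hno
        constructor
        · rintro ⟨r', hr', hrx, p, hp1, hp2⟩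
          exact hno ⟨r', Or.inr hr', hrx, p, hp1, ((hmemo' p).mp hp2).1⟩
        · rintro rfl
          exact hno ⟨r, Or.inl rfl, rfl, hc.2⟩
    · rw [pvStepAny, if_neg hc, ih _ hnd ht.2 hp']
      apply List.filter_congr
      intro x hx
      rw [Bool.eq_iff_iff]
      simp only [decide_eq_true_eq, List.mem_cons]
      constructor
      · rintro hno ⟨r', hr', hrx, hex⟩
        rcases hr' with rfl | hr'
        · exact hc ⟨hrx ▸ hx, hex⟩
        · exact hno ⟨r', hr', hrx, hex⟩
      · rintro hno ⟨r', hr', hrx, hex⟩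
        exact hno ⟨r', Or.inr hr', hrx, hex⟩

-- with unique outer keys, find? returns the unique matching entry
theorem find?_key_unique {α : Type} (od : List (String × α)) (hnd : (od.map Prod.fst).Nodup)
    (name : String) (nv : String × α) (h1 : nv ∈ od) (h2 : nv.1 = name) :
    od.find? (fun kv => kv.1 == name) = some nv := by
  induction od with
  | nil => cases h1
  | cons a rest ih =>
    simp only [List.map_cons, List.nodup_cons] at hnd
    rcases List.mem_cons.mp h1 with rfl | hmem
    · simp [h2]
    · have hne : (a.1 == name) = false := by
        simp only [beq_eq_false_iff_ne, ne_eq]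
        intro e
        apply hnd.1
        rw [e]
        exact List.mem_map.mpr ⟨nv, hmem, h2⟩
      simp only [List.find?_cons, hne]
      exact ih hnd.2 hmem

-- every member of the built list carries one of the outer keys
theorem mem_build_fst (status : List (String × Int)) (od : List (String × List (String × Int)))
    (x : String × String) (hx : x ∈ pvBuild status od) : x.1 ∈ od.map Prod.fst := by
  obtain ⟨nv, hnv, hin⟩ := List.mem_flatMap.mp hx
  split_ifs at hin
  · obtain ⟨kv, -, hkv⟩ := List.mem_map.mp hin
    exact (congrArg Prod.fst hkv) ▸ List.mem_map.mpr ⟨nv, hnv, rfl⟩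
  · simp at hin

-- membership in the built list is exactly Source B's 'qualifies'
theorem mem_build_iff (status : List (String × Int)) (od : List (String × List (String × Int)))
    (hnd : (od.map Prod.fst).Nodup) (name num : String) :
    ((name, num) ∈ pvBuild status od) ↔ pvQual status od name num = true := by
  unfold pvQual
  simp only [Bool.and_eq_true, decide_eq_true_eq]
  constructor
  · intro hx
    obtain ⟨nv, hnv, hin⟩ := List.mem_flatMap.mp hx
    split_ifs at hin with hst
    · obtain ⟨kv, hkv, heq⟩ := List.mem_map.mp hin
      obtain ⟨hkv1, hkv2⟩ := List.mem_filter.mp hkv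
      have e1 : nv.1 = name := congrArg Prod.fst heq
      have e2 : kv.1 = num := congrArg Prod.snd heq
      rw [find?_key_unique od hnd name nv hnv e1]
      refine ⟨⟨⟨e1 ▸ hst, List.mem_map.mpr ⟨nv, hnv, e1⟩⟩, ?_⟩, ?_⟩
      · exact List.mem_map.mpr ⟨kv, hkv1, e2⟩
      · rw [← e1, ← e2]; exact hkv2
    · simp at hin
  · rintro ⟨⟨⟨hst, hkey⟩, hnum⟩, hkeep⟩
    obtain ⟨nv, hnv, e1⟩ := List.mem_map.mp hkey
    rw [find?_key_unique od hnd name nv hnv e1] at hnum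
    obtain ⟨kv, hkv, e2⟩ := List.mem_map.mp hnum
    refine List.mem_flatMap.mpr ⟨nv, hnv, ?_⟩
    rw [if_pos (e1 ▸ hst)]
    exact List.mem_map.mpr ⟨kv, List.mem_filter.mpr ⟨hkv, by rw [e1, e2]; exact hkeep⟩,
      by rw [e1, e2]⟩

-- with unique outer and inner keys the built list has no duplicates
theorem build_nodup (status : List (String × Int)) (od : List (String × List (String × Int)))
    (hnd : (od.map Prod.fst).Nodup) (hin : ∀ nv ∈ od, (nv.2.map Prod.fst).Nodup) :
    (pvBuild status od).Nodup := by
  induction od with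
  | nil => simp [pvBuild]
  | cons nv rest ih =>
    simp only [List.map_cons, List.nodup_cons] at hnd
    have hrest : (pvBuild status rest).Nodup :=
      ih hnd.2 (fun nv' h' => hin nv' (List.mem_cons_of_mem _ h'))
    have hstep : pvBuild status (nv :: rest) =
        (if nv.1 ∈ status.map Prod.fst then
          (nv.2.filter (fun kv => pvKeep status nv.1 kv.1)).map (fun kv => (nv.1, kv.1))
        else []) ++ pvBuild status rest := by
      simp [pvBuild]
    rw [hstep]
    apply List.Nodup.append
    · split_ifs
      · have : (nv.2.filter (fun kv => pvKeep status nv.1 kv.1)).map (fun kv => (nv.1, kv.1)) =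
            ((nv.2.filter (fun kv => pvKeep status nv.1 kv.1)).map Prod.fst).map
              (fun k => (nv.1, k)) := by
          simp [List.map_map, Function.comp]
        rw [this]
        refine List.Nodup.map (fun a b hab => by simpa using hab) ?_
        exact ((hin nv (List.mem_cons_self ..)).sublist
          (((nv.2.filter_sublist ..)).map Prod.fst))
      · simp
    · exact hrest
    · intro x hx hy
      have hx1 : x.1 = nv.1 := by
        split_ifs at hx
        · obtain ⟨kv, -, hkv⟩ := List.mem_map.mp hx
          exact (congrArg Prod.fst hkv).symm
        · simp at hx
      have hy1 : x.1 ∈ rest.map Prod.fst := mem_build_fst status rest x hy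
      apply hnd.1
      rw [← hx1]
      exact hy1

-- filtering distributes over flatMap
theorem filter_flatMap' {a b : Type} (l : List a) (g : a -> List b) (p : b -> Bool) :
    (l.flatMap g).filter p = l.flatMap (fun x => (g x).filter p) := by
  induction l with
  | nil => simp
  | cons x t ih => simp [List.filter_append, ih]

-- B's fused comprehension = the built list filtered by non-suppression
theorem alt_eq_filter (status : List (String × Int)) (od : List (String × List (String × Int))) :
    outfit_count_alt status od =
      (pvBuild status od).filter (fun x => !pvSuppressed status od x.1 x.2) := by
  unfold outfit_count_alt pvBuild
  rw [filter_flatMap']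
  congr 1
  funext nv
  split_ifs with h
  · rw [List.filter_map, List.filter_filter]
    refine congrArg (List.map _) (List.filter_congr fun kv _ => ?_)
    simp [Function.comp, Bool.and_comm]
  · simp

-- membership in a find?-getD lookup comes from some matching row of the table
theorem find?_getD_mem {α : Type} (tbl : List (String × List α)) (name : String)
    (x : α) (hx : x ∈ ((tbl.find? (fun kv => kv.1 == name)).getD (name, [])).2) :
    ∃ row ∈ tbl, row.1 = name ∧ x ∈ row.2 := by
  induction tbl with
  | nil => simp at hx
  | cons a rest ih =>
    rw [List.find?_cons] at hx
    cases hb : (a.1 == name) with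
    | true =>
      rw [hb] at hx
      exact ⟨a, List.mem_cons_self .., beq_iff_eq.mp hb, by simpa using hx⟩
    | false =>
      rw [hb] at hx
      obtain ⟨row, hr, h1, h2⟩ := ih hx
      exact ⟨row, List.mem_cons_of_mem _ hr, h1, h2⟩

-- Source B's suppressed ↔ some rule of the table targets the pair and a partner qualifies
theorem suppressed_iff (status : List (String × Int)) (od : List (String × List (String × Int)))
    (name num : String) :
    pvSuppressed status od name num = true ↔
      ∃ r ∈ pvRules, r.1 = (name, num) ∧ ∃ p ∈ r.2, pvQual status od p.1 p.2 = true := by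
  constructor
  · intro h
    simp only [pvSuppressed, Bool.and_eq_true, decide_eq_true_eq, List.any_eq_true] at h
    obtain ⟨hnum, x, hx, hq⟩ := h
    simp only [List.mem_cons, List.not_mem_nil, or_false] at hnum
    obtain ⟨row, hrow, hname, hxr⟩ := find?_getD_mem pvSuppressorsTbl name x hx
    subst hname
    fin_cases hrow <;> fin_cases hxr <;>
      rcases hnum with rfl | rfl | rfl <;>
      simp only [pvRules] <;> simp_all <;> refine ⟨_, _, ?_, hq⟩ <;> simp
  · rintro ⟨r, hr, hrx, p, hp, hq⟩
    fin_cases hr <;> injection hrx with e1 e2 <;> subst e1 <;> subst e2 <;>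
      simp_all [pvSuppressed, pvSuppressorsTbl] <;>
      rcases hp with rfl | rfl | rfl <;> simp_all

-- ===== VERDICT (by name: the statement is the Claim_ definition above) =====
theorem outfit_count_spec : Claim_equal_outfit_count := by
  intro status od _ hpre
  obtain ⟨hout, hinn, -, -⟩ := hpre
  unfold Spec_outfit_count outfit_count
  rw [pvBuild_eq]
  have hnd := build_nodup status od hout hinn
  have hcnt : ∀ lvl ∈ (["2", "3", "5"] : List String),
      (pvBuild status od).count ("Black Feather", lvl) ≤ 1 :=
    fun lvl _ => List.nodup_iff_count_le_one.mp hnd _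
  rw [pvRemovals_eq _ hcnt,
      foldl_stepAny_filter pvRules _ hnd (by decide) (by decide),
      alt_eq_filter]
  apply List.filter_congr
  intro x hx
  have hiff : (∃ r ∈ pvRules, r.1 = x ∧ ∃ p ∈ r.2, p ∈ pvBuild status od) ↔
      pvSuppressed status od x.1 x.2 = true := by
    rw [suppressed_iff status od x.1 x.2]
    constructor <;> rintro ⟨r, hr, hrx, p, hp1, hp2⟩ <;>
      exact ⟨r, hr, by simpa using hrx, p, hp1, by
        first
        | exact (mem_build_iff status od hout p.1 p.2).mp hp2
        | exact (mem_build_iff status od hout p.1 p.2).mpr hp2⟩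
  rw [Bool.eq_iff_iff]
  simp only [decide_eq_true_eq, Bool.not_eq_true', Bool.eq_false_iff, ne_eq]
  exact not_congr hiff
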